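-- pv_equiv track=rewrite | github.com/styleseat/ss_eventlet | ss_eventlet/utils.py | iter_ancestor_module_names
-- ===== SOURCE A (Python) =====
-- def iter_ancestor_module_names(module_name):
--     """Iterate over the given module's ancestors, starting at the root."""
--     if not module_name:
--         raise ValueError('Invalid module name: %s' % (module_name,))
--     ancestor = None
--     for name in module_name.split('.'):
--         if ancestor is None:
--             ancestor = name
--         else:
--             ancestor = '.'.join((ancestor, name))
--         yield ancestor
-- ===== SOURCE B (Python) =====
-- def iter_ancestor_module_names(module_name):
--     """Iterate over the given module's ancestors, starting at the root."""
--     if not module_name: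
--         raise ValueError('Invalid module name: %s' % (module_name,))
--     for i, ch in enumerate(module_name):
--         if ch == '.':
--             yield module_name[:i]
--     yield module_name
-- ===== Notes on version B (the rewrite author's own statement) =====
-- stated objective: simpler
-- what changed: B scans the string once for dot separator positions and yields a slice of the original string at each one, plus the full name at the end, instead of splitting the string and re-joining an accumulated ancestor part by part.
import Mathlib
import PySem

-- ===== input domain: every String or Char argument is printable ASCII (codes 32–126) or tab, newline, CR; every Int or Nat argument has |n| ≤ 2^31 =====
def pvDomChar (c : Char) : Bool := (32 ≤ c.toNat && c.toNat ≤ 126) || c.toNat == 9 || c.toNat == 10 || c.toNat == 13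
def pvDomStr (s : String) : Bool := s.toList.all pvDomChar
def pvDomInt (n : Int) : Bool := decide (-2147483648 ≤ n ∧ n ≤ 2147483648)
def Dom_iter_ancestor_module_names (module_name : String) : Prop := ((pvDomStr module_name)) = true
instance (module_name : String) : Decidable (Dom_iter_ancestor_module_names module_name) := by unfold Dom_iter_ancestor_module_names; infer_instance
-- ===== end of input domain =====

-- B replaces A's split-then-rejoin accumulation by a single scan over dot positions that
-- slices the original string; equivalence is on the list of yielded values (both raise
-- ValueError on the empty string, excluded by Pre_).

-- ===== PORT A =====
-- '.'.join((ancestor, name))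
def pvAJoin (a n : List Char) : List Char := PySem.Chars.join ['.'] [a, n]

-- the 'for name in module_name.split('.')' loop with the Optional ancestor accumulator
def pvAGo : Option (List Char) → List (List Char) → List (List Char)
  | _, [] => []
  | none, n :: rest => n :: pvAGo (some n) rest
  | some a, n :: rest => pvAJoin a n :: pvAGo (some (pvAJoin a n)) rest

def iter_ancestor_module_names (module_name : String) : List String :=
  if module_name.toList = [] then []  -- 'raise ValueError' in Python: excluded by Pre_
  else (pvAGo none (PySem.Chars.splitOn module_name.toList ['.'])).map String.mk

-- ===== PORT B =====
def iter_ancestor_module_names_alt (module_name : String) : List String :=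
  if module_name.toList = [] then []  -- 'raise ValueError' in Python: excluded by Pre_
  else
    (((PySem.List.enumerate module_name.toList 0).foldl
        (fun acc p =>
          if p.2 == '.' then acc ++ [PySem.List.slice module_name.toList none (some p.1)] else acc) [])
      ++ [module_name.toList]).map String.mk

-- ===== PRECONDITION & SPEC =====
-- Pre_ excludes only the empty string, on which both A and B raise ValueError.
def Pre_iter_ancestor_module_names (module_name : String) : Prop := ¬ (module_name.toList = [])
instance (module_name : String) : Decidable (Pre_iter_ancestor_module_names module_name) := by unfold Pre_iter_ancestor_module_names; infer_instance
def pvWitness_iter_ancestor_module_names : String := "a.b"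

def Spec_iter_ancestor_module_names (module_name : String) (out : List String) : Prop := out = iter_ancestor_module_names_alt module_name
instance (module_name : String) (out : List String) : Decidable (Spec_iter_ancestor_module_names module_name out) := by unfold Spec_iter_ancestor_module_names; infer_instance

-- ===== CLAIM (what is proved, stated in full; the proofs are below) =====
def Claim_equal_iter_ancestor_module_names : Prop := ∀ (module_name : String), Dom_iter_ancestor_module_names module_name → Pre_iter_ancestor_module_names module_name → Spec_iter_ancestor_module_names module_name (iter_ancestor_module_names module_name)

-- ===== LEMMAS AND PROOFS =====

-- str.split('.') as a plain structural recursion (left piece accumulated in `pre`)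
def pvMySplit : List Char → List Char → List (List Char)
  | pre, [] => [pre]
  | pre, c :: r => if c = '.' then pre :: pvMySplit [] r else pvMySplit (pre ++ [c]) r

-- the common value of both programs: the prefix `full` extended right, emitted at each dot,
-- plus the whole string at the end
def pvPrefAll : List Char → List Char → List (List Char)
  | full, [] => [full]
  | full, c :: r => if c = '.' then full :: pvPrefAll (full ++ [c]) r else pvPrefAll (full ++ [c]) r

def pvAncFull : Option (List Char) → List Char → List Char
  | none, pre => pre
  | some a, pre => a ++ '.' :: pre

theorem pvGoSpec (s : List Char) : ∀ (fuel : Nat) (cur : List Char) (acc : List (List Char)),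
    s.length ≤ fuel →
    PySem.Chars.splitOn.go ['.'] fuel s cur acc = acc.reverse ++ pvMySplit cur.reverse s := by
  induction s with
  | nil =>
    intro fuel cur acc h
    cases fuel with
    | zero => rw [PySem.Chars.splitOn.go.eq_1]; simp [pvMySplit]
    | succ n =>
      rw [PySem.Chars.splitOn.go.eq_2 ['.'] (n+1) cur acc (by omega)]
      simp [pvMySplit]
  | cons c r ih =>
    intro fuel cur acc h
    cases fuel with
    | zero => simp at h
    | succ n =>
      rw [PySem.Chars.splitOn.go.eq_3]
      by_cases hc : c = '.'
      · subst hc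
        simp only [List.isPrefixOf, BEq.rfl, Bool.true_and, if_true, List.length_cons,
          List.length_nil, List.drop_succ_cons, List.drop_zero]
        rw [ih n [] (cur.reverse :: acc) (by simpa using Nat.le_of_succ_le_succ h)]
        simp [pvMySplit]
      · have hb : (['.'].isPrefixOf (c :: r)) = false := by
          simp [List.isPrefixOf]; exact fun h' => hc h'.symm
        rw [hb]
        simp only [Bool.false_eq_true, if_neg, not_false_iff]
        rw [ih n (c :: cur) acc (by simpa using Nat.le_of_succ_le_succ h)]
        simp [pvMySplit, hc]

theorem pvSplitOn_eq (cs : List Char) : PySem.Chars.splitOn cs ['.'] = pvMySplit [] cs := by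
  show PySem.Chars.splitOn.go ['.'] (cs.length + 1) cs [] [] = pvMySplit [] cs
  rw [pvGoSpec cs (cs.length + 1) [] [] (by omega)]
  simp

theorem pvAJoin_eq (a n : List Char) : pvAJoin a n = a ++ '.' :: n := by
  simp [pvAJoin, PySem.Chars.join, List.intercalate, List.intersperse]

theorem pvAGoSpec (s : List Char) : ∀ (pre : List Char) (anc : Option (List Char)),
    pvAGo anc (pvMySplit pre s) = pvPrefAll (pvAncFull anc pre) s := by
  induction s with
  | nil =>
    intro pre anc
    cases anc <;> simp [pvMySplit, pvAGo, pvPrefAll, pvAncFull, pvAJoin_eq]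
  | cons c r ih =>
    intro pre anc
    by_cases hc : c = '.'
    · subst hc
      have h1 : pvMySplit pre ('.' :: r) = pre :: pvMySplit [] r := by simp [pvMySplit]
      have h2 : ∀ full, pvPrefAll full ('.' :: r) = full :: pvPrefAll (full ++ ['.']) r := by
        intro full; simp [pvPrefAll]
      cases anc with
      | none =>
        rw [h1]
        simp only [pvAGo]
        rw [h2, ih [] (some pre)]
        simp [pvAncFull]
      | some a =>
        rw [h1]
        simp only [pvAGo, pvAJoin_eq]
        rw [h2, ih [] (some (a ++ '.' :: pre))]
        simp [pvAncFull]
    · have h1 : pvMySplit pre (c :: r) = pvMySplit (pre ++ [c]) r := by simp [pvMySplit, hc]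
      have h2 : ∀ full, pvPrefAll full (c :: r) = pvPrefAll (full ++ [c]) r := by
        intro full; simp [pvPrefAll, hc]
      cases anc with
      | none =>
        rw [h1, h2, ih (pre ++ [c]) none]
        simp [pvAncFull]
      | some a =>
        rw [h1, h2, ih (pre ++ [c]) (some a)]
        simp [pvAncFull]

theorem pvBSpec (cs : List Char) : ∀ (pre : List Char),
    ((PySem.List.enumerate cs ((pre.length : Int))).filter (fun p => p.2 == '.')).map
        (fun p => PySem.List.slice (pre ++ cs) none (some p.1)) ++ [pre ++ cs]
      = pvPrefAll pre cs := by
  induction cs with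
  | nil => intro pre; simp [PySem.List.enumerate_nil, pvPrefAll]
  | cons c r ih =>
    intro pre
    rw [PySem.List.enumerate_cons]
    have hcast : (pre.length : Int) + 1 = (((pre ++ [c]).length : Nat) : Int) := by
      simp
    have hlist : pre ++ c :: r = (pre ++ [c]) ++ r := by simp
    rw [hlist, hcast]
    by_cases hc : c = '.'
    · subst hc
      have htake : PySem.List.slice ((pre ++ ['.']) ++ r) none (some ((pre.length : Nat) : Int))
          = pre := by
        rw [PySem.List.slice_to_natCast]
        try simp [List.append_assoc]
      simp only [List.filter_cons, BEq.rfl, if_true, List.map_cons, List.cons_append]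
      rw [ih (pre ++ ['.'])]
      rw [htake]
      simp [pvPrefAll]
    · have hcf : ((c == '.') : Bool) = false := by simp [hc]
      simp only [List.filter_cons, hcf, Bool.false_eq_true, if_false]
      rw [ih (pre ++ [c])]
      simp [pvPrefAll, hc]

-- ===== VERDICT (by name: the statement is the Claim_ definition above) =====
theorem iter_ancestor_module_names_spec : Claim_equal_iter_ancestor_module_names := by
  intro s _ hpre
  show iter_ancestor_module_names s = iter_ancestor_module_names_alt s
  have hne : s.toList ≠ [] := hpre
  unfold iter_ancestor_module_names iter_ancestor_module_names_alt
  rw [if_neg hne, if_neg hne]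
  rw [pvSplitOn_eq, pvAGoSpec s.toList [] none]
  rw [PySem.List.foldl_append_if]
  have h0 := pvBSpec s.toList []
  simp only [List.length_nil, Nat.cast_zero, List.nil_append] at h0
  rw [List.nil_append, h0]
  rfl
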